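-- pv_equiv track=rewrite | github.com/walidabn/DigitalCommunication | Digital Communication 2020/helpers.py | find_absolute_min_index_2
-- ===== SOURCE A (Python) =====
-- def find_absolute_min_index_2(h):
--     minimum = 10000000000
--     min_index= 0
--     min_index_2 = 0
--     for i in range(len(h)):
--         if abs(h[i]) < minimum :
--             minimum = abs(h[i])
--             min_index = i
--     minimum = 10000000000
--     for i in range(len(h)):
--         if (abs(h[i]) < minimum) and (i!=min_index) :
--             minimum = abs(h[i])
--             min_index_2 = i
--
--     return min_index_2
-- ===== SOURCE B (Python) =====
-- def find_absolute_min_index_2(h):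
--     minimum = 10000000000
--     minimum2 = 10000000000
--     min_index = 0
--     min_index_2 = 0
--     for i in range(len(h)):
--         a = abs(h[i])
--         if a < minimum:
--             minimum2, min_index_2 = minimum, min_index
--             minimum, min_index = a, i
--         elif a < minimum2:
--             minimum2, min_index_2 = a, i
--     return min_index_2
-- ===== Notes on version B (the rewrite author's own statement) =====
-- stated objective: alternative
-- what changed: Replaces A's two full passes (find the minimum, then re-scan excluding its index) by a single pass that maintains the two smallest absolute values and their indices, shifting the best into the runner-up on a new minimum.
import Mathlib
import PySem

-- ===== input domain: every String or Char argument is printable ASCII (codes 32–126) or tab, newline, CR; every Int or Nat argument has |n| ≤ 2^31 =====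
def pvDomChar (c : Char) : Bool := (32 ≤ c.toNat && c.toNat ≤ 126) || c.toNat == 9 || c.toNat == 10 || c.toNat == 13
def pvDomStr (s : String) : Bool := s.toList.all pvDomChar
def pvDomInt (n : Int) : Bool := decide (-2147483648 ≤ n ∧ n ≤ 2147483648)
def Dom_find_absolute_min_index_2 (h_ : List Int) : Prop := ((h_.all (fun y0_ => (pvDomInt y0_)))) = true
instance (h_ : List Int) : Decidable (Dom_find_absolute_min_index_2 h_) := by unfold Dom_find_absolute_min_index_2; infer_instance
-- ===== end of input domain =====

-- B replaces A's two full passes by a single pass tracking the two smallest absolute values; return value only.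

-- ===== PORT A =====
def find_absolute_min_index_2 (h_ : List Int) : Int :=
  let p1 := (PySem.List.pyRange 0 (h_.length : Int) 1).foldl
    (fun (st : Int × Int) (i : Int) =>
      if |PySem.List.pyGetD h_ i 0| < st.1 then (|PySem.List.pyGetD h_ i 0|, i) else st)
    ((10000000000 : Int), 0)
  let p2 := (PySem.List.pyRange 0 (h_.length : Int) 1).foldl
    (fun (st : Int × Int) (i : Int) =>
      if |PySem.List.pyGetD h_ i 0| < st.1 ∧ i ≠ p1.2 then (|PySem.List.pyGetD h_ i 0|, i) else st)
    ((10000000000 : Int), 0)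
  p2.2

-- ===== PORT B =====
def find_absolute_min_index_2_alt (h_ : List Int) : Int :=
  let st := (PySem.List.pyRange 0 (h_.length : Int) 1).foldl
    (fun (st : (Int × Int) × (Int × Int)) (i : Int) =>
      let a := |PySem.List.pyGetD h_ i 0|
      if a < st.1.1 then ((a, i), st.1)
      else if a < st.2.1 then (st.1, (a, i))
      else st)
    (((10000000000 : Int), 0), ((10000000000 : Int), 0))
  st.2.2

-- ===== PRECONDITION & SPEC =====
def Spec_find_absolute_min_index_2 (h_ : List Int) (out : Int) : Prop := out = find_absolute_min_index_2_alt h_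
instance (h_ : List Int) (out : Int) : Decidable (Spec_find_absolute_min_index_2 h_ out) := by unfold Spec_find_absolute_min_index_2; infer_instance

-- ===== CLAIM (what is proved, stated in full; the proofs are below) =====
def Claim_equal_find_absolute_min_index_2 : Prop := ∀ (h_ : List Int), Dom_find_absolute_min_index_2 h_ → Spec_find_absolute_min_index_2 h_ (find_absolute_min_index_2 h_)

-- ===== LEMMAS AND PROOFS =====

def pvStep1 (st : Int × Int) (p : Int × Int) : Int × Int :=
  if |p.2| < st.1 then (|p.2|, p.1) else st

def pvStep2 (mi : Int) (st : Int × Int) (p : Int × Int) : Int × Int :=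
  if |p.2| < st.1 ∧ p.1 ≠ mi then (|p.2|, p.1) else st

def pvStepB (st : (Int × Int) × (Int × Int)) (p : Int × Int) : (Int × Int) × (Int × Int) :=
  if |p.2| < st.1.1 then ((|p.2|, p.1), st.1)
  else if |p.2| < st.2.1 then (st.1, (|p.2|, p.1))
  else st

lemma pvP2_of_not_mem (mi : Int) :
    ∀ (l : List (Int × Int)) (st : Int × Int), (∀ p ∈ l, p.1 ≠ mi) →
      l.foldl (pvStep2 mi) st = l.foldl pvStep1 st := by
  intro l
  induction l with
  | nil => intro st _; rfl
  | cons p t ih =>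
    intro st hne
    simp only [List.foldl_cons]
    rw [ih _ (fun q hq => hne q (List.mem_cons_of_mem _ hq))]
    have hp : p.1 ≠ mi := hne p (List.mem_cons_self ..)
    simp [pvStep1, pvStep2, hp]

lemma pvSnd_step1_lt {i : Int} :
    ∀ (l : List (Int × Int)) (st : Int × Int), (∀ p ∈ l, p.1 < i) → st.2 < i →
      (l.foldl pvStep1 st).2 < i := by
  intro l
  induction l with
  | nil => intro st _ h; exact h
  | cons p t ih =>
    intro st hlt hst
    simp only [List.foldl_cons]
    apply ih _ (fun q hq => hlt q (List.mem_cons_of_mem _ hq))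
    have hp : p.1 < i := hlt p (List.mem_cons_self ..)
    by_cases h : |p.2| < st.1 <;> simp [pvStep1, h, hst, hp]

lemma pvEnum_idx_lt (t : List Int) :
    ∀ p ∈ PySem.List.enumerate t 0, p.1 < (t.length : Int) := by
  intro p hp
  rcases (PySem.List.mem_enumerate_iff t 0 p).1 hp with ⟨k, hk, rfl⟩
  simp
  exact_mod_cast hk

-- key invariant: the single pass computes A's first pass and A's second pass (with A's final min_index)
lemma pvMaster (h : List Int) :
    (PySem.List.enumerate h 0).foldl pvStepB (((10000000000 : Int), 0), ((10000000000 : Int), 0))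
      = ((PySem.List.enumerate h 0).foldl pvStep1 ((10000000000 : Int), 0),
         (PySem.List.enumerate h 0).foldl
           (pvStep2 ((PySem.List.enumerate h 0).foldl pvStep1 ((10000000000 : Int), 0)).2)
           ((10000000000 : Int), 0)) := by
  induction h using List.reverseRecOn with
  | nil => rfl
  | append_singleton t x ih =>
    have henum : PySem.List.enumerate (t ++ [x]) 0
        = PySem.List.enumerate t 0 ++ [((t.length : Int), x)] := by
      rw [PySem.List.enumerate_append]; simp [PySem.List.enumerate]
    set L := PySem.List.enumerate t 0 with hL
    set S : Int := 10000000000 with hS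
    set i : Int := (t.length : Int) with hi
    have hidx : ∀ p ∈ L, p.1 < i := pvEnum_idx_lt t
    set m := (L.foldl pvStep1 (S, 0)).1 with hm
    set mi := (L.foldl pvStep1 (S, 0)).2 with hmi
    have hP1 : L.foldl pvStep1 (S, 0) = (m, mi) := rfl
    rw [henum]
    simp only [List.foldl_append, List.foldl_cons, List.foldl_nil, ih, hP1]
    by_cases h1 : |x| < m
    · -- new minimum: best shifts into the runner-up
      have hstep1 : pvStep1 (m, mi) (i, x) = (|x|, i) := by simp [pvStep1, h1]
      have hP2i : L.foldl (pvStep2 i) (S, 0) = (m, mi) := by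
        rw [pvP2_of_not_mem i L _ (fun p hp => ne_of_lt (hidx p hp))]
      simp [pvStepB, pvStep2, h1, hstep1, hP2i]
    · have hstep1 : pvStep1 (m, mi) (i, x) = (m, mi) := by simp [pvStep1, h1]
      rw [hstep1]
      set m2 := (L.foldl (pvStep2 mi) (S, 0)).1 with hm2
      set mi2 := (L.foldl (pvStep2 mi) (S, 0)).2 with hmi2
      have hP2 : L.foldl (pvStep2 mi) (S, 0) = (m2, mi2) := rfl
      rw [hP2]
      by_cases h2 : |x| < m2
      · -- runner-up improves; need i ≠ mi
        have hne : i ≠ mi := by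
          by_cases hnil : L = []
          · exfalso
            have hmS : m = S := by rw [hm, hnil]; rfl
            have hm2S : m2 = S := by rw [hm2, hnil]; rfl
            rw [hmS] at h1; rw [hm2S] at h2; exact h1 h2
          · have ht : t ≠ [] := by
              intro h0
              apply hnil
              rw [hL, h0]; rfl
            have hpos : (0 : Int) < i := by
              rw [hi]; exact_mod_cast List.length_pos_of_ne_nil ht
            have : mi < i := pvSnd_step1_lt L (S, 0) hidx hpos
            exact (ne_of_lt this).symm
        simp [pvStepB, pvStep2, h1, h2, hne]
      · simp [pvStepB, pvStep2, h1, h2]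

lemma pvFold_bridge {σ : Type} (h : List Int) (F : σ → Int × Int → σ) (init : σ) :
    (PySem.List.pyRange 0 (h.length : Int) 1).foldl
        (fun acc j => F acc (j, PySem.List.pyGetD h j 0)) init
      = (PySem.List.enumerate h 0).foldl F init := by
  rw [PySem.List.enumerate_eq_map_pyRange (d := 0), List.foldl_map]
  simp [PySem.List.len_eq]

lemma pvBridge1 (h : List Int) :
    (PySem.List.pyRange 0 (h.length : Int) 1).foldl
        (fun (st : Int × Int) (i : Int) =>
          if |PySem.List.pyGetD h i 0| < st.1 then (|PySem.List.pyGetD h i 0|, i) else st)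
        ((10000000000 : Int), 0)
      = (PySem.List.enumerate h 0).foldl pvStep1 ((10000000000 : Int), 0) :=
  pvFold_bridge h pvStep1 _

lemma pvBridge2 (h : List Int) (mi : Int) :
    (PySem.List.pyRange 0 (h.length : Int) 1).foldl
        (fun (st : Int × Int) (i : Int) =>
          if |PySem.List.pyGetD h i 0| < st.1 ∧ i ≠ mi then (|PySem.List.pyGetD h i 0|, i) else st)
        ((10000000000 : Int), 0)
      = (PySem.List.enumerate h 0).foldl (pvStep2 mi) ((10000000000 : Int), 0) :=
  pvFold_bridge h (pvStep2 mi) _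

lemma pvBridgeB (h : List Int) :
    (PySem.List.pyRange 0 (h.length : Int) 1).foldl
        (fun (st : (Int × Int) × (Int × Int)) (i : Int) =>
          let a := |PySem.List.pyGetD h i 0|
          if a < st.1.1 then ((a, i), st.1)
          else if a < st.2.1 then (st.1, (a, i))
          else st)
        (((10000000000 : Int), 0), ((10000000000 : Int), 0))
      = (PySem.List.enumerate h 0).foldl pvStepB (((10000000000 : Int), 0), ((10000000000 : Int), 0)) :=
  pvFold_bridge h pvStepB _

-- ===== VERDICT (by name: the statement is the Claim_ definition above) =====
theorem find_absolute_min_index_2_spec : Claim_equal_find_absolute_min_index_2 := by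
  intro h_ _
  show find_absolute_min_index_2 h_ = find_absolute_min_index_2_alt h_
  simp only [find_absolute_min_index_2, find_absolute_min_index_2_alt,
    pvBridge1, pvBridge2, pvBridgeB, pvMaster]
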